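-- pv_equiv track=rewrite | github.com/iangif/g2p-pronunciation-tutor | backend/main.py | find_ipa_diff
-- ===== SOURCE A (Python) =====
-- def arpa_to_ipa(arpa_char):
--     end = ''
--     arpa_ipa_map = {'AA': 'ɑ', 'AE': 'æ', 'AH': 'ə', 'AO': 'ɔ', 'AW': 'aʊ', 'AY': 'aɪ', 'B': 'b', 'CH': 'ʧ', 'D': 'd', 'DH': 'ð', 'EH': 'ɛ',
--         'ER': 'ɚ', 'EY': 'eɪ', 'F': 'f', 'G': 'ɡ', 'HH': 'h', 'IH': 'ɪ', 'IY': 'iː', 'JH': 'ʤ', 'K': 'k', 'L': 'l', 'M': 'm', 'N': 'n', 'NG': 'ŋ',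
--         'OW': 'oʊ', 'OY': 'ɔɪ', 'P': 'p', 'R': 'ɹ', 'S': 's', 'SH': 'ʃ', 'T': 't', 'TH': 'θ', 'UH': 'ʊ', 'UW': 'uː', 'V': 'v', 'W': 'w', 'Y': 'j',
--         'Z': 'z', 'ZH': 'ʒ'
--     }
--     if arpa_char[-1] in '012':
--         arpa_char = arpa_char[:-1]
--     return arpa_ipa_map[arpa_char]
--
-- def find_ipa_diff(base_arpa, compare_arpa):
--     base_ipa = [arpa_to_ipa(p) for p in base_arpa if p != ' ']
--     comp_ipa = [arpa_to_ipa(p) for p in compare_arpa if p != ' ']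
--
--     m, n = len(base_ipa), len(comp_ipa)
--     dp = [[0]*(n+1) for _ in range(m+1)]
--     backtrace = [[(0, 0)]*(n+1) for _ in range(m+1)]
--
--     # Fill DP matrix
--     for i in range(m+1):
--         for j in range(n+1):
--             if i == 0:
--                 dp[i][j] = j
--                 backtrace[i][j] = (i, j-1)
--             elif j == 0:
--                 dp[i][j] = i
--                 backtrace[i][j] = (i-1, j)
--             elif base_ipa[i-1] == comp_ipa[j-1]:
--                 dp[i][j] = dp[i-1][j-1]
--                 backtrace[i][j] = (i-1, j-1)
--             else:
--                 choices = [
--                     (dp[i-1][j] + 1, (i-1, j)),   # delete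
--                     (dp[i][j-1] + 1, (i, j-1)),   # insert
--                     (dp[i-1][j-1] + 1, (i-1, j-1)) # substitute
--                 ]
--                 dp[i][j], backtrace[i][j] = min(choices)
--
--     # Trace back
--     i, j = m, n
--     aligned = []
--     while i > 0 or j > 0:
--         pi, pj = backtrace[i][j]
--         if pi == i - 1 and pj == j - 1:
--             if i > 0 and j > 0 and base_ipa[i-1] == comp_ipa[j-1]:
--                 aligned.append(comp_ipa[j-1])
--             else:
--                 aligned.append(f'<span class="custom-underline">{comp_ipa[j-1]}</span>')
--         elif pi == i and pj == j - 1: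
--             aligned.append(f'<span class="custom-underline">{comp_ipa[j-1]}</span>')
--         elif pi == i - 1 and pj == j:
--             aligned.append("_")
--         i, j = pi, pj
--
--     aligned.reverse()
--     return '/' + ''.join(aligned) + '/'
-- ===== SOURCE B (Python) =====
-- def arpa_to_ipa(arpa_char):
--     end = ''
--     arpa_ipa_map = {'AA': 'ɑ', 'AE': 'æ', 'AH': 'ə', 'AO': 'ɔ', 'AW': 'aʊ', 'AY': 'aɪ', 'B': 'b', 'CH': 'ʧ', 'D': 'd', 'DH': 'ð', 'EH': 'ɛ',
--         'ER': 'ɚ', 'EY': 'eɪ', 'F': 'f', 'G': 'ɡ', 'HH': 'h', 'IH': 'ɪ', 'IY': 'iː', 'JH': 'ʤ', 'K': 'k', 'L': 'l', 'M': 'm', 'N': 'n', 'NG': 'ŋ',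
--         'OW': 'oʊ', 'OY': 'ɔɪ', 'P': 'p', 'R': 'ɹ', 'S': 's', 'SH': 'ʃ', 'T': 't', 'TH': 'θ', 'UH': 'ʊ', 'UW': 'uː', 'V': 'v', 'W': 'w', 'Y': 'j',
--         'Z': 'z', 'ZH': 'ʒ'
--     }
--     if arpa_char[-1] in '012':
--         arpa_char = arpa_char[:-1]
--     return arpa_ipa_map[arpa_char]
--
-- def find_ipa_diff(base_arpa, compare_arpa):
--     # B: forward DP with no backtrace and no back-walk at all: every cell carries
--     # (cost, diff-HTML-so-far), built row by row keeping only the previous row;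
--     # the answer is read off the last cell directly.  Tie-break on equal costs
--     # (substitute, then delete, then insert) is the one A's tuple-min realises.
--     base_ipa = [arpa_to_ipa(p) for p in base_arpa if p != ' ']
--     comp_ipa = [arpa_to_ipa(p) for p in compare_arpa if p != ' ']
--     m, n = len(base_ipa), len(comp_ipa)
--
--     span = '<span class="custom-underline">{}</span>'
--     prev = [(0, '')]
--     for j in range(1, n + 1):
--         prev.append((j, prev[j - 1][1] + span.format(comp_ipa[j - 1])))
--     for i in range(1, m + 1):
--         cur = [(i, prev[0][1] + '_')]
--         for j in range(1, n + 1):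
--             if base_ipa[i - 1] == comp_ipa[j - 1]:
--                 cur.append((prev[j - 1][0], prev[j - 1][1] + comp_ipa[j - 1]))
--             else:
--                 cd = prev[j][0] + 1       # delete
--                 ci = cur[j - 1][0] + 1    # insert
--                 cs = prev[j - 1][0] + 1   # substitute
--                 if cs <= cd and cs <= ci:
--                     cur.append((cs, prev[j - 1][1] + span.format(comp_ipa[j - 1])))
--                 elif cd <= ci:
--                     cur.append((cd, prev[j][1] + '_'))
--                 else:
--                     cur.append((ci, cur[j - 1][1] + span.format(comp_ipa[j - 1])))
--         prev = cur
--     return '/' + prev[n][1] + '/'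
-- ===== Notes on version B (the rewrite author's own statement) =====
-- stated objective: alternative
-- what changed: B eliminates both the backtrace matrix and the whole trace-back loop: it runs a single forward DP in which every cell carries the pair (edit cost, diff-HTML built so far), keeping only the previous row, and reads the answer straight off the last cell; the substitute<delete<insert tie-break of A's tuple-min is applied at fill time instead of being recovered by a back-walk.
import Mathlib
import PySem

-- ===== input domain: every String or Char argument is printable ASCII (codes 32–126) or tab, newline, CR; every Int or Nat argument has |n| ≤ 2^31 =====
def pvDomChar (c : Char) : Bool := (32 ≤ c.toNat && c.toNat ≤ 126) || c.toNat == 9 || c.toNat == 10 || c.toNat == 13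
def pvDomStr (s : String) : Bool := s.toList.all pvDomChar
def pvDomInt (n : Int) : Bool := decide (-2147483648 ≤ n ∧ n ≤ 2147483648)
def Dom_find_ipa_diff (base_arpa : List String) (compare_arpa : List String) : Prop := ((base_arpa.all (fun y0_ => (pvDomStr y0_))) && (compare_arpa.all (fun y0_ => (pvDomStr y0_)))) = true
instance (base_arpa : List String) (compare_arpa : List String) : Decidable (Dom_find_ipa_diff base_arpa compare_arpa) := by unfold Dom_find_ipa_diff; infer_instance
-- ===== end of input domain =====

-- B replaces A's backtrace matrix AND its trace-back loop by one forward DP whose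
-- cells carry (cost, diff-HTML-so-far); same return value, no speed claim.

-- ===== PORT A =====

-- module-level helper arpa_to_ipa (the same Python helper is used by A and by B);
-- returns none exactly where Python raises (IndexError on '', KeyError on an unknown symbol)
def ipaPairs : List (String × String) := [("AA", "ɑ"), ("AE", "æ"), ("AH", "ə"), ("AO", "ɔ"), ("AW", "aʊ"), ("AY", "aɪ"), ("B", "b"), ("CH", "ʧ"), ("D", "d"), ("DH", "ð"), ("EH", "ɛ"), ("ER", "ɚ"), ("EY", "eɪ"), ("F", "f"), ("G", "ɡ"), ("HH", "h"), ("IH", "ɪ"), ("IY", "iː"), ("JH", "ʤ"), ("K", "k"), ("L", "l"), ("M", "m"), ("N", "n"), ("NG", "ŋ"), ("OW", "oʊ"), ("OY", "ɔɪ"), ("P", "p"), ("R", "ɹ"), ("S", "s"), ("SH", "ʃ"), ("T", "t"), ("TH", "θ"), ("UH", "ʊ"), ("UW", "uː"), ("V", "v"), ("W", "w"), ("Y", "j"), ("Z", "z"), ("ZH", "ʒ")]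

def arpa_to_ipa? (arpa_char : String) : Option String :=
  match PySem.Str.pyGet? arpa_char (-1) with          -- arpa_char[-1]; none = IndexError
  | none => none
  | some c =>
    -- c in '012' for a single char is exactly this disjunction
    let s := if c = '0' ∨ c = '1' ∨ c = '2' then PySem.Str.slice arpa_char none (some (-1)) else arpa_char
    (PySem.Dict.ofList ipaPairs).get? s               -- arpa_ipa_map[s]; none = KeyError

-- f'<span class="custom-underline">{x}</span>' (both Pythons build this literal)
def spanU (x : String) : String := "<span class=\"custom-underline\">" ++ x ++ "</span>"

-- Python's min over the 3-tuple list [(cost,(pi,pj)),…]: keep the first strictly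
-- smaller element under lexicographic tuple order (hand port, exact for Int tuples)
def pyLexLt (a b : Int × Int × Int) : Bool :=
  a.1 < b.1 || (a.1 == b.1 && (a.2.1 < b.2.1 || (a.2.1 == b.2.1 && a.2.2 < b.2.2)))

def pymin3 (a b c : Int × Int × Int) : Int × Int × Int :=
  let m1 := a
  let m2 := if pyLexLt b m1 then b else m1
  if pyLexLt c m2 then c else m2

-- one cell of A's fill loop: (dp[i][j], backtrace[i][j]); dpRows = rows above, dpRow = current row so far
-- (Python pre-fills the matrices with zeros but never reads an unwritten cell, so
-- reading the completed rows/prefix is value-exact)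
def cellA (bI cI : List String) (dpRows : List (List Int)) (dpRow : List Int) (i j : Nat) : Int × Int × Int :=
  if i = 0 then ((j : Int), (i : Int), (j : Int) - 1)
  else if j = 0 then ((i : Int), (i : Int) - 1, (j : Int))
  else if bI.getD (i - 1) "" = cI.getD (j - 1) "" then
    ((dpRows.getD (i - 1) []).getD (j - 1) 0, (i : Int) - 1, (j : Int) - 1)
  else
    pymin3 ((dpRows.getD (i - 1) []).getD j 0 + 1, (i : Int) - 1, (j : Int))       -- delete
           (dpRow.getD (j - 1) 0 + 1, (i : Int), (j : Int) - 1)                    -- insert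
           ((dpRows.getD (i - 1) []).getD (j - 1) 0 + 1, (i : Int) - 1, (j : Int) - 1)  -- substitute

-- the inner loop: for j in range(n+1): … (dpRows = the rows already filled)
def innerA (bI cI : List String) (dpRows : List (List Int)) (i n : Nat) : List Int × List (Int × Int) :=
  (List.range (n + 1)).foldl (fun rw j =>
    let v := cellA bI cI dpRows rw.1 i j
    (rw.1 ++ [v.1], rw.2 ++ [(v.2.1, v.2.2)])) ([], [])

-- the outer loop: for i in range(m+1): …
def fillA (bI cI : List String) (m n : Nat) : List (List Int) × List (List (Int × Int)) :=
  (List.range (m + 1)).foldl (fun st i =>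
    let inner := innerA bI cI st.1 i n
    (st.1 ++ [inner.1], st.2 ++ [inner.2])) ([], [])

-- the trace-back while loop (fuel = m+n bounds the steps; each step lowers i+j)
def walkA (bI cI : List String) (bt : List (List (Int × Int))) : Nat → Int → Int → List String → List String
  | 0, _, _, acc => acc
  | fuel + 1, i, j, acc =>
    if i > 0 ∨ j > 0 then
      let p := PySem.List.pyGetD (PySem.List.pyGetD bt i []) j (0, 0)
      let acc' :=
        if p.1 = i - 1 ∧ p.2 = j - 1 then
          if i > 0 ∧ j > 0 ∧ PySem.List.pyGetD bI (i - 1) "" = PySem.List.pyGetD cI (j - 1) "" then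
            acc ++ [PySem.List.pyGetD cI (j - 1) ""]
          else acc ++ [spanU (PySem.List.pyGetD cI (j - 1) "")]
        else if p.1 = i ∧ p.2 = j - 1 then acc ++ [spanU (PySem.List.pyGetD cI (j - 1) "")]
        else if p.1 = i - 1 ∧ p.2 = j then acc ++ ["_"]
        else acc
      walkA bI cI bt fuel p.1 p.2 acc'
    else acc

def find_ipa_diff (base_arpa : List String) (compare_arpa : List String) : String :=
  match (base_arpa.filter (fun p => p ≠ " ")).mapM arpa_to_ipa?,
        (compare_arpa.filter (fun p => p ≠ " ")).mapM arpa_to_ipa? with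
  | some bI, some cI =>
    let m := bI.length
    let n := cI.length
    let tbl := fillA bI cI m n
    let aligned := walkA bI cI tbl.2 (m + n) (m : Int) (n : Int) []
    "/" ++ PySem.Str.join "" aligned.reverse ++ "/"
  | _, _ => ""                                        -- Python raises here; outside Pre_

-- ===== PORT B =====
-- forward DP: a row is a list of cells (cost, diff-HTML built so far); only the
-- previous row is kept, no backtrace, no trace-back loop

-- row 0: prev = [(0,'')]; for j in range(1, n+1): append (j, prev[j-1][1] + span)
def rowZeroB (cI : List String) (n : Nat) : List (Int × String) :=
  (List.range' 1 n).foldl (fun prev (j : Nat) =>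
    prev ++ [(((j : Nat) : Int), (prev.getD (j - 1) (0, "")).2 ++ spanU (cI.getD (j - 1) ""))])
    [((0 : Int), "")]

-- one later row: cur = [(i, prev[0][1] + '_')]; for j in range(1, n+1): append the chosen cell
def rowStepB (bI cI : List String) (prev : List (Int × String)) (i n : Nat) : List (Int × String) :=
  (List.range' 1 n).foldl (fun cur j =>
    cur ++ [
      if bI.getD (i - 1) "" = cI.getD (j - 1) "" then
        ((prev.getD (j - 1) (0, "")).1, (prev.getD (j - 1) (0, "")).2 ++ cI.getD (j - 1) "")
      else
        let cd := (prev.getD j (0, "")).1 + 1        -- delete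
        let ci := (cur.getD (j - 1) (0, "")).1 + 1   -- insert
        let cs := (prev.getD (j - 1) (0, "")).1 + 1  -- substitute
        if cs ≤ cd ∧ cs ≤ ci then (cs, (prev.getD (j - 1) (0, "")).2 ++ spanU (cI.getD (j - 1) ""))
        else if cd ≤ ci then (cd, (prev.getD j (0, "")).2 ++ "_")
        else (ci, (cur.getD (j - 1) (0, "")).2 ++ spanU (cI.getD (j - 1) ""))])
    [((i : Int), (prev.getD 0 (0, "")).2 ++ "_")]

-- for i in range(1, m+1): prev = cur
def lastRowB (bI cI : List String) (m n : Nat) : List (Int × String) :=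
  (List.range' 1 m).foldl (fun prev i => rowStepB bI cI prev i n) (rowZeroB cI n)

def find_ipa_diff_alt (base_arpa : List String) (compare_arpa : List String) : String :=
  match (base_arpa.filter (fun p => p ≠ " ")).mapM arpa_to_ipa? with
  | none => ""
  | some bI =>
  match (compare_arpa.filter (fun p => p ≠ " ")).mapM arpa_to_ipa? with
  | none => ""
  | some cI =>
    let n := cI.length
    "/" ++ (PySem.List.pyGetD (lastRowB bI cI bI.length n) (n : Int) ((0 : Int), "")).2 ++ "/"

-- ===== PRECONDITION & SPEC =====

-- the ARPA keys, for the precondition only (independent of the ports)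
def arpaKeys : List String := ["AA", "AE", "AH", "AO", "AW", "AY", "B", "CH", "D", "DH", "EH", "ER", "EY", "F", "G", "HH", "IH", "IY", "JH", "K", "L", "M", "N", "NG", "OW", "OY", "P", "R", "S", "SH", "T", "TH", "UH", "UW", "V", "W", "Y", "Z", "ZH"]

-- arpa_char with its trailing stress digit (if any) removed, on the list side
def stripDigit (p : String) : String :=
  match p.toList.getLast? with
  | some ch => if ch = '0' ∨ ch = '1' ∨ ch = '2' then String.ofList p.toList.dropLast else p
  | none => p

-- Pre_ excludes exactly the inputs on which Python A raises: a non-space entry that is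
-- empty (IndexError) or whose digit-stripped form is not an ARPA key (KeyError).
def Pre_find_ipa_diff (base_arpa : List String) (compare_arpa : List String) : Prop :=
  ∀ p ∈ base_arpa ++ compare_arpa, p ≠ " " → p.toList ≠ [] ∧ stripDigit p ∈ arpaKeys

instance (base_arpa : List String) (compare_arpa : List String) : Decidable (Pre_find_ipa_diff base_arpa compare_arpa) := by
  unfold Pre_find_ipa_diff; infer_instance

def pvWitness_find_ipa_diff : List String × List String := (["HH", "AH0", " ", "T"], ["AE1", "T"])

def Spec_find_ipa_diff (base_arpa : List String) (compare_arpa : List String) (out : String) : Prop := out = find_ipa_diff_alt base_arpa compare_arpa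
instance (base_arpa : List String) (compare_arpa : List String) (out : String) : Decidable (Spec_find_ipa_diff base_arpa compare_arpa out) := by unfold Spec_find_ipa_diff; infer_instance

-- ===== CLAIM (what is proved, stated in full; the proofs are below) =====
def Claim_equal_find_ipa_diff : Prop := ∀ (base_arpa : List String) (compare_arpa : List String), Dom_find_ipa_diff base_arpa compare_arpa → Pre_find_ipa_diff base_arpa compare_arpa → Spec_find_ipa_diff base_arpa compare_arpa (find_ipa_diff base_arpa compare_arpa)

-- ===== LEMMAS AND PROOFS =====

-- the cost/backtrace recurrence: DB i j = (dp[i][j], backtrace[i][j]) of A's fill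
def DB (bI cI : List String) : Nat → Nat → Int × Int × Int
  | 0, j => ((j : Int), 0, (j : Int) - 1)
  | i + 1, 0 => ((i : Int) + 1, (i : Int), 0)
  | i + 1, j + 1 =>
    if bI.getD i "" = cI.getD j "" then ((DB bI cI i j).1, (i : Int), (j : Int))
    else
      pymin3 ((DB bI cI i (j + 1)).1 + 1, (i : Int), (j : Int) + 1)
             ((DB bI cI (i + 1) j).1 + 1, (i : Int) + 1, (j : Int))
             ((DB bI cI i j).1 + 1, (i : Int), (j : Int))
  termination_by i j => i + j

-- the alignment A's trace-back reconstructs, read forwards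
def alignT (bI cI : List String) : Nat → Nat → List String
  | 0, 0 => []
  | 0, j + 1 => alignT bI cI 0 j ++ [spanU (cI.getD j "")]
  | i + 1, 0 => alignT bI cI i 0 ++ ["_"]
  | i + 1, j + 1 =>
    if bI.getD i "" = cI.getD j "" then alignT bI cI i j ++ [cI.getD j ""]
    else
      let cd := (DB bI cI i (j + 1)).1 + 1
      let ci := (DB bI cI (i + 1) j).1 + 1
      let cs := (DB bI cI i j).1 + 1
      if cs ≤ cd ∧ cs ≤ ci then alignT bI cI i j ++ [spanU (cI.getD j "")]
      else if cd ≤ ci then alignT bI cI i (j + 1) ++ ["_"]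
      else alignT bI cI (i + 1) j ++ [spanU (cI.getD j "")]
  termination_by i j => i + j

-- Python's tuple-min over [delete, insert, substitute] with these index pairs,
-- resolved into the cost comparisons B uses (sub wins ties, then delete, then insert)
theorem pymin3_choose (cd ci cs p q : Int) :
    pymin3 (cd, p, q + 1) (ci, p + 1, q) (cs, p, q) =
      (if cs ≤ cd ∧ cs ≤ ci then (min (min cd ci) cs, p, q)
       else if cd ≤ ci then (min (min cd ci) cs, p, q + 1)
       else (min (min cd ci) cs, p + 1, q)) := by
  simp only [pymin3, pyLexLt, Bool.or_eq_true, Bool.and_eq_true, decide_eq_true_eq, beq_iff_eq]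
  split_ifs <;> simp_all [Prod.ext_iff] <;> omega

theorem pymin3_fst (cd ci cs p q : Int) :
    (pymin3 (cd, p, q + 1) (ci, p + 1, q) (cs, p, q)).1 = min (min cd ci) cs := by
  rw [pymin3_choose]; split_ifs <;> rfl

theorem cellA_eq (bI cI : List String) (rows : List (List Int)) (pre : List Int)
    (i k n : Nat) (hk : k ≤ n)
    (hrow : 1 ≤ i → ∀ j ≤ n, (rows.getD (i - 1) []).getD j 0 = (DB bI cI (i - 1) j).1)
    (hpre : ∀ j < k, pre.getD j 0 = (DB bI cI i j).1) :
    cellA bI cI rows pre i k = DB bI cI i k := by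
  cases i with
  | zero => simp [cellA, DB]
  | succ i' =>
    have hr := hrow (by omega)
    cases k with
    | zero => simp [cellA, DB]
    | succ k' =>
      have e3 : ((k' + 1 : Nat) : Int) = (k' : Int) + 1 := by push_cast; ring
      have e4 : ((i' + 1 : Nat) : Int) = (i' : Int) + 1 := by push_cast; ring
      simp only [cellA, Nat.succ_ne_zero, if_false, Nat.add_sub_cancel, e3, e4,
        add_sub_cancel_right]
      simp only [Nat.add_sub_cancel] at hr
      rw [hr (k' + 1) (by omega), hr k' (by omega), hpre k' (by omega)]
      by_cases he : bI.getD i' "" = cI.getD k' ""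
      · rw [if_pos he]; simp only [DB]; rw [if_pos he]
      · rw [if_neg he]; simp only [DB]; rw [if_neg he]

theorem innerA_partial (bI cI : List String) (rows : List (List Int)) (i n : Nat)
    (hrow : 1 ≤ i → ∀ j ≤ n, (rows.getD (i - 1) []).getD j 0 = (DB bI cI (i - 1) j).1) :
    ∀ k, k ≤ n + 1 →
      ((List.range k).foldl (fun rw j =>
          let v := cellA bI cI rows rw.1 i j
          (rw.1 ++ [v.1], rw.2 ++ [(v.2.1, v.2.2)])) (([] : List Int), ([] : List (Int × Int)))).1.length = k ∧
      ((List.range k).foldl (fun rw j =>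
          let v := cellA bI cI rows rw.1 i j
          (rw.1 ++ [v.1], rw.2 ++ [(v.2.1, v.2.2)])) (([] : List Int), ([] : List (Int × Int)))).2.length = k ∧
      ∀ j < k,
        ((List.range k).foldl (fun rw j =>
            let v := cellA bI cI rows rw.1 i j
            (rw.1 ++ [v.1], rw.2 ++ [(v.2.1, v.2.2)])) (([] : List Int), ([] : List (Int × Int)))).1.getD j 0 = (DB bI cI i j).1 ∧
        ((List.range k).foldl (fun rw j =>
            let v := cellA bI cI rows rw.1 i j
            (rw.1 ++ [v.1], rw.2 ++ [(v.2.1, v.2.2)])) (([] : List Int), ([] : List (Int × Int)))).2.getD j (0, 0) = ((DB bI cI i j).2.1, (DB bI cI i j).2.2) := by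
  intro k
  induction k with
  | zero => intro _; refine ⟨rfl, rfl, ?_⟩; intro j hj; omega
  | succ k ihk =>
    intro hk
    obtain ⟨hl1, hl2, hv⟩ := ihk (by omega)
    rw [List.range_succ, List.foldl_append]
    set r := (List.range k).foldl (fun rw j =>
      let v := cellA bI cI rows rw.1 i j
      (rw.1 ++ [v.1], rw.2 ++ [(v.2.1, v.2.2)])) (([] : List Int), ([] : List (Int × Int))) with hr
    have hcell : cellA bI cI rows r.1 i k = DB bI cI i k :=
      cellA_eq bI cI rows r.1 i k n (by omega) hrow (fun j hj => (hv j hj).1)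
    simp only [List.foldl_cons, List.foldl_nil]
    refine ⟨by simp [hl1], by simp [hl2], ?_⟩
    intro j hj
    by_cases hjk : j < k
    · rw [List.getD_append _ _ _ _ (by omega), List.getD_append _ _ _ _ (by omega)]
      exact hv j hjk
    · have hjeq : j = k := by omega
      subst hjeq
      rw [List.getD_append_right _ _ _ _ (by omega), List.getD_append_right _ _ _ _ (by omega)]
      simp [hl1, hl2, hcell]

theorem innerA_spec (bI cI : List String) (rows : List (List Int)) (i n : Nat)
    (hrow : 1 ≤ i → ∀ j ≤ n, (rows.getD (i - 1) []).getD j 0 = (DB bI cI (i - 1) j).1) :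
    (innerA bI cI rows i n).1.length = n + 1 ∧ (innerA bI cI rows i n).2.length = n + 1 ∧
    ∀ j ≤ n, (innerA bI cI rows i n).1.getD j 0 = (DB bI cI i j).1 ∧
      (innerA bI cI rows i n).2.getD j (0, 0) = ((DB bI cI i j).2.1, (DB bI cI i j).2.2) := by
  obtain ⟨h1, h2, h3⟩ := innerA_partial bI cI rows i n hrow (n + 1) (le_refl _)
  exact ⟨h1, h2, fun j hj => h3 j (by omega)⟩

theorem fillA_succ (bI cI : List String) (m n : Nat) :
    fillA bI cI (m + 1) n =
      ((fillA bI cI m n).1 ++ [(innerA bI cI (fillA bI cI m n).1 (m + 1) n).1],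
       (fillA bI cI m n).2 ++ [(innerA bI cI (fillA bI cI m n).1 (m + 1) n).2]) := by
  simp [fillA, List.range_succ]

theorem fillA_spec (bI cI : List String) (m n : Nat) :
    (fillA bI cI m n).1.length = m + 1 ∧ (fillA bI cI m n).2.length = m + 1 ∧
    ∀ i ≤ m, ((fillA bI cI m n).1.getD i []).length = n + 1 ∧
      ((fillA bI cI m n).2.getD i []).length = n + 1 ∧
      ∀ j ≤ n, ((fillA bI cI m n).1.getD i []).getD j 0 = (DB bI cI i j).1 ∧
        ((fillA bI cI m n).2.getD i []).getD j (0, 0) = ((DB bI cI i j).2.1, (DB bI cI i j).2.2) := by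
  induction m with
  | zero =>
    obtain ⟨h1, h2, h3⟩ := innerA_spec bI cI [] 0 n (by omega)
    refine ⟨rfl, rfl, ?_⟩
    intro i hi
    have : i = 0 := by omega
    subst this
    have e : fillA bI cI 0 n = ([(innerA bI cI [] 0 n).1], [(innerA bI cI [] 0 n).2]) := by
      simp [fillA]
    rw [e]
    exact ⟨h1, h2, fun j hj => h3 j hj⟩
  | succ m ihm =>
    obtain ⟨hL1, hL2, hrows⟩ := ihm
    have hrowm : 1 ≤ m + 1 → ∀ j ≤ n, ((fillA bI cI m n).1.getD (m + 1 - 1) []).getD j 0 = (DB bI cI (m + 1 - 1) j).1 := by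
      intro _ j hj
      simpa using ((hrows m (le_refl _)).2.2 j hj).1
    obtain ⟨h1, h2, h3⟩ := innerA_spec bI cI (fillA bI cI m n).1 (m + 1) n hrowm
    rw [fillA_succ]
    refine ⟨by simp [hL1], by simp [hL2], ?_⟩
    intro i hi
    by_cases him : i ≤ m
    · rw [List.getD_append _ _ _ _ (by omega), List.getD_append _ _ _ _ (by omega)]
      exact hrows i him
    · have : i = m + 1 := by omega
      subst this
      rw [List.getD_append_right _ _ _ _ (by omega), List.getD_append_right _ _ _ _ (by omega)]
      simp only [hL1, hL2, Nat.sub_self, List.getD]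
      simpa using ⟨h1, h2, fun j hj => h3 j hj⟩

-- one-step unfolding of A's back-walk (definitional)
theorem walkA_succ (bI cI : List String) (bt : List (List (Int × Int))) (fuel : Nat) (i j : Int) (acc : List String) :
    walkA bI cI bt (fuel + 1) i j acc =
      if i > 0 ∨ j > 0 then
        walkA bI cI bt fuel (PySem.List.pyGetD (PySem.List.pyGetD bt i []) j (0, 0)).1
          (PySem.List.pyGetD (PySem.List.pyGetD bt i []) j (0, 0)).2
          (if (PySem.List.pyGetD (PySem.List.pyGetD bt i []) j (0, 0)).1 = i - 1 ∧ (PySem.List.pyGetD (PySem.List.pyGetD bt i []) j (0, 0)).2 = j - 1 then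
            if i > 0 ∧ j > 0 ∧ PySem.List.pyGetD bI (i - 1) "" = PySem.List.pyGetD cI (j - 1) "" then
              acc ++ [PySem.List.pyGetD cI (j - 1) ""]
            else acc ++ [spanU (PySem.List.pyGetD cI (j - 1) "")]
          else if (PySem.List.pyGetD (PySem.List.pyGetD bt i []) j (0, 0)).1 = i ∧ (PySem.List.pyGetD (PySem.List.pyGetD bt i []) j (0, 0)).2 = j - 1 then
            acc ++ [spanU (PySem.List.pyGetD cI (j - 1) "")]
          else if (PySem.List.pyGetD (PySem.List.pyGetD bt i []) j (0, 0)).1 = i - 1 ∧ (PySem.List.pyGetD (PySem.List.pyGetD bt i []) j (0, 0)).2 = j then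
            acc ++ ["_"]
          else acc)
      else acc := rfl

-- A's trace-back from (a,b) emits exactly alignT a b, backwards
theorem walkA_align (bI cI : List String) (m n : Nat) :
    ∀ (fuel a b : Nat) (acc : List String), a ≤ m → b ≤ n → a + b ≤ fuel →
      walkA bI cI (fillA bI cI m n).2 fuel (a : Int) (b : Int) acc = acc ++ (alignT bI cI a b).reverse := by
  intro fuel
  induction fuel with
  | zero =>
    intro a b acc ham hbn hf
    have ha : a = 0 := by omega
    have hb : b = 0 := by omega
    subst ha; subst hb
    simp [walkA, alignT]
  | succ fuel ih =>
    intro a b acc ham hbn hf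
    have hbt : PySem.List.pyGetD (PySem.List.pyGetD (fillA bI cI m n).2 (a : Int) []) (b : Int) ((0 : Int), (0 : Int)) = ((DB bI cI a b).2.1, (DB bI cI a b).2.2) := by
      simp only [PySem.List.pyGetD_natCast]
      exact (((fillA_spec bI cI m n).2.2 a ham).2.2 b hbn).2
    cases a with
    | zero =>
      cases b with
      | zero =>
        rw [walkA_succ, if_neg (by omega : ¬(((0 : Nat) : Int) > 0 ∨ ((0 : Nat) : Int) > 0))]
        simp [alignT]
      | succ b' =>
        have h0 : ((0 : Nat) : Int) > 0 ∨ ((b' + 1 : Nat) : Int) > 0 := by right; omega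
        have h1 : (PySem.List.pyGetD (PySem.List.pyGetD (fillA bI cI m n).2 ((0 : Nat) : Int) []) ((b' + 1 : Nat) : Int) ((0 : Int), (0 : Int))).1 = (0 : Int) := by
          rw [hbt]; simp [DB]
        have h2 : (PySem.List.pyGetD (PySem.List.pyGetD (fillA bI cI m n).2 ((0 : Nat) : Int) []) ((b' + 1 : Nat) : Int) ((0 : Int), (0 : Int))).2 = ((b' + 1 : Nat) : Int) - 1 := by
          rw [hbt]; simp [DB]
        have hgc : PySem.List.pyGetD cI (((b' + 1 : Nat) : Int) - 1) "" = cI.getD b' "" := by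
          rw [show ((b' + 1 : Nat) : Int) - 1 = ((b' : Nat) : Int) from by omega]
          simp [PySem.List.pyGetD_natCast]
        have hgc' : PySem.List.pyGetD cI ((b' : Nat) : Int) "" = cI.getD b' "" := by
          simp [PySem.List.pyGetD_natCast]
        rw [walkA_succ, h1, h2, if_pos h0,
          if_neg (by omega : ¬((0 : Int) = ((0 : Nat) : Int) - 1 ∧ ((b' + 1 : Nat) : Int) - 1 = ((b' + 1 : Nat) : Int) - 1)),
          if_pos (by omega : (0 : Int) = ((0 : Nat) : Int) ∧ ((b' + 1 : Nat) : Int) - 1 = ((b' + 1 : Nat) : Int) - 1),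
          show ((b' + 1 : Nat) : Int) - 1 = ((b' : Nat) : Int) from by omega]
        have hrec := ih 0 b' (acc ++ [spanU (PySem.List.pyGetD cI ((b' : Nat) : Int) "")]) (by omega) (by omega) (by omega)
        rw [Nat.cast_zero] at hrec
        rw [hrec]
        simp only [alignT, List.reverse_append, List.reverse_cons, List.reverse_nil]
        rw [hgc']
        simp
    | succ a' =>
      cases b with
      | zero =>
        have h0 : ((a' + 1 : Nat) : Int) > 0 ∨ ((0 : Nat) : Int) > 0 := by left; omega
        have h1 : (PySem.List.pyGetD (PySem.List.pyGetD (fillA bI cI m n).2 ((a' + 1 : Nat) : Int) []) ((0 : Nat) : Int) ((0 : Int), (0 : Int))).1 = (a' : Int) := by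
          rw [hbt]; simp [DB]
        have h2 : (PySem.List.pyGetD (PySem.List.pyGetD (fillA bI cI m n).2 ((a' + 1 : Nat) : Int) []) ((0 : Nat) : Int) ((0 : Int), (0 : Int))).2 = (0 : Int) := by
          rw [hbt]; simp [DB]
        rw [walkA_succ, h1, h2, if_pos h0,
          if_neg (by omega : ¬((a' : Int) = ((a' + 1 : Nat) : Int) - 1 ∧ (0 : Int) = ((0 : Nat) : Int) - 1)),
          if_neg (by omega : ¬((a' : Int) = ((a' + 1 : Nat) : Int) ∧ (0 : Int) = ((0 : Nat) : Int) - 1)),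
          if_pos (by omega : (a' : Int) = ((a' + 1 : Nat) : Int) - 1 ∧ (0 : Int) = ((0 : Nat) : Int))]
        have hrec := ih a' 0 (acc ++ ["_"]) (by omega) (by omega) (by omega)
        rw [Nat.cast_zero] at hrec
        rw [hrec]
        simp only [alignT, List.reverse_append, List.reverse_cons, List.reverse_nil]
        simp
      | succ b' =>
        have h0 : ((a' + 1 : Nat) : Int) > 0 ∨ ((b' + 1 : Nat) : Int) > 0 := by left; omega
        have ea : ((a' + 1 : Nat) : Int) - 1 = (a' : Int) := by omega
        have eb : ((b' + 1 : Nat) : Int) - 1 = (b' : Int) := by omega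
        have hgb : PySem.List.pyGetD bI (((a' + 1 : Nat) : Int) - 1) "" = bI.getD a' "" := by
          rw [ea]; simp [PySem.List.pyGetD_natCast]
        have hgc : PySem.List.pyGetD cI (((b' + 1 : Nat) : Int) - 1) "" = cI.getD b' "" := by
          rw [eb]; simp [PySem.List.pyGetD_natCast]
        by_cases heq : bI.getD a' "" = cI.getD b' ""
        · have h1 : (PySem.List.pyGetD (PySem.List.pyGetD (fillA bI cI m n).2 ((a' + 1 : Nat) : Int) []) ((b' + 1 : Nat) : Int) ((0 : Int), (0 : Int))).1 = (a' : Int) := by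
            rw [hbt]; simp only [DB]; rw [if_pos heq]
          have h2 : (PySem.List.pyGetD (PySem.List.pyGetD (fillA bI cI m n).2 ((a' + 1 : Nat) : Int) []) ((b' + 1 : Nat) : Int) ((0 : Int), (0 : Int))).2 = (b' : Int) := by
            rw [hbt]; simp only [DB]; rw [if_pos heq]
          have hstr : ((a' + 1 : Nat) : Int) > 0 ∧ ((b' + 1 : Nat) : Int) > 0 ∧ PySem.List.pyGetD bI (((a' + 1 : Nat) : Int) - 1) "" = PySem.List.pyGetD cI (((b' + 1 : Nat) : Int) - 1) "" :=
            ⟨by omega, by omega, by rw [hgb, hgc]; exact heq⟩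
          rw [walkA_succ, h1, h2, if_pos h0,
            if_pos (by constructor <;> [rw [ea]; rw [eb]] : (a' : Int) = ((a' + 1 : Nat) : Int) - 1 ∧ (b' : Int) = ((b' + 1 : Nat) : Int) - 1),
            if_pos hstr]
          rw [ih a' b' _ (by omega) (by omega) (by omega)]
          simp only [alignT]
          rw [if_pos heq, hgc]
          simp
        · have hbt' : PySem.List.pyGetD (PySem.List.pyGetD (fillA bI cI m n).2 ((a' + 1 : Nat) : Int) []) ((b' + 1 : Nat) : Int) ((0 : Int), (0 : Int)) =
              (if (DB bI cI a' b').1 + 1 ≤ (DB bI cI a' (b' + 1)).1 + 1 ∧ (DB bI cI a' b').1 + 1 ≤ (DB bI cI (a' + 1) b').1 + 1 then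
                ((a' : Int), (b' : Int))
              else if (DB bI cI a' (b' + 1)).1 + 1 ≤ (DB bI cI (a' + 1) b').1 + 1 then ((a' : Int), (b' : Int) + 1)
              else ((a' : Int) + 1, (b' : Int))) := by
            rw [hbt]
            have : DB bI cI (a' + 1) (b' + 1) =
                pymin3 ((DB bI cI a' (b' + 1)).1 + 1, (a' : Int), (b' : Int) + 1)
                       ((DB bI cI (a' + 1) b').1 + 1, (a' : Int) + 1, (b' : Int))
                       ((DB bI cI a' b').1 + 1, (a' : Int), (b' : Int)) := by
              simp only [DB]; rw [if_neg heq]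
            rw [this, pymin3_choose]
            split_ifs <;> rfl
          have hne : ¬(((a' + 1 : Nat) : Int) > 0 ∧ ((b' + 1 : Nat) : Int) > 0 ∧ PySem.List.pyGetD bI (((a' + 1 : Nat) : Int) - 1) "" = PySem.List.pyGetD cI (((b' + 1 : Nat) : Int) - 1) "") := by
            rw [hgb, hgc]; rintro ⟨-, -, h⟩; exact heq h
          have halign : alignT bI cI (a' + 1) (b' + 1) =
              (if (DB bI cI a' b').1 + 1 ≤ (DB bI cI a' (b' + 1)).1 + 1 ∧ (DB bI cI a' b').1 + 1 ≤ (DB bI cI (a' + 1) b').1 + 1 then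
                alignT bI cI a' b' ++ [spanU (cI.getD b' "")]
              else if (DB bI cI a' (b' + 1)).1 + 1 ≤ (DB bI cI (a' + 1) b').1 + 1 then alignT bI cI a' (b' + 1) ++ ["_"]
              else alignT bI cI (a' + 1) b' ++ [spanU (cI.getD b' "")]) := by
            simp only [alignT]; rw [if_neg heq]
          by_cases hc1 : (DB bI cI a' b').1 + 1 ≤ (DB bI cI a' (b' + 1)).1 + 1 ∧ (DB bI cI a' b').1 + 1 ≤ (DB bI cI (a' + 1) b').1 + 1
          · rw [if_pos hc1] at hbt'
            have h1 := congrArg Prod.fst hbt'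
            have h2 := congrArg Prod.snd hbt'
            simp only at h1 h2
            rw [walkA_succ, h1, h2, if_pos h0,
              if_pos (by constructor <;> [rw [ea]; rw [eb]] : (a' : Int) = ((a' + 1 : Nat) : Int) - 1 ∧ (b' : Int) = ((b' + 1 : Nat) : Int) - 1),
              if_neg hne]
            rw [ih a' b' _ (by omega) (by omega) (by omega), halign, if_pos hc1, hgc]
            simp
          · rw [if_neg hc1] at hbt'
            by_cases hc2 : (DB bI cI a' (b' + 1)).1 + 1 ≤ (DB bI cI (a' + 1) b').1 + 1
            · rw [if_pos hc2] at hbt'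
              have h1 := congrArg Prod.fst hbt'
              have h2 := congrArg Prod.snd hbt'
              simp only at h1 h2
              rw [walkA_succ, h1, h2, if_pos h0,
                if_neg (by omega : ¬((a' : Int) = ((a' + 1 : Nat) : Int) - 1 ∧ (b' : Int) + 1 = ((b' + 1 : Nat) : Int) - 1)),
                if_neg (by omega : ¬((a' : Int) = ((a' + 1 : Nat) : Int) ∧ (b' : Int) + 1 = ((b' + 1 : Nat) : Int) - 1)),
                if_pos (by omega : (a' : Int) = ((a' + 1 : Nat) : Int) - 1 ∧ (b' : Int) + 1 = ((b' + 1 : Nat) : Int)),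
                show ((b' : Nat) : Int) + 1 = ((b' + 1 : Nat) : Int) from by omega]
              rw [ih a' (b' + 1) _ (by omega) (by omega) (by omega), halign, if_neg hc1, if_pos hc2]
              simp
            · rw [if_neg hc2] at hbt'
              have h1 := congrArg Prod.fst hbt'
              have h2 := congrArg Prod.snd hbt'
              simp only at h1 h2
              rw [walkA_succ, h1, h2, if_pos h0,
                if_neg (by omega : ¬((a' : Int) + 1 = ((a' + 1 : Nat) : Int) - 1 ∧ (b' : Int) = ((b' + 1 : Nat) : Int) - 1)),
                if_pos (by omega : (a' : Int) + 1 = ((a' + 1 : Nat) : Int) ∧ (b' : Int) = ((b' + 1 : Nat) : Int) - 1),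
                show ((a' : Nat) : Int) + 1 = ((a' + 1 : Nat) : Int) from by omega]
              rw [ih (a' + 1) b' _ (by omega) (by omega) (by omega), halign, if_neg hc1, if_neg hc2, hgc]
              simp

-- ''.join over an appended token
theorem flatten_intersperse_nil {α : Type} (xs : List (List α)) :
    (List.intersperse [] xs).flatten = xs.flatten := by
  induction xs with
  | nil => rfl
  | cons h t ih =>
    cases t with
    | nil => rfl
    | cons h2 t2 => simp_all [List.intersperse]

theorem join_nil_eq (l : List String) :
    PySem.Str.join "" l = String.ofList (l.map String.toList).flatten := by
  simp [PySem.Str.join, PySem.Chars.join, List.intercalate, flatten_intersperse_nil]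

theorem join_append_one (l : List String) (t : String) :
    PySem.Str.join "" (l ++ [t]) = PySem.Str.join "" l ++ t := by
  simp [join_nil_eq]

theorem join_nil : PySem.Str.join "" ([] : List String) = "" := rfl

-- ===== B-side invariants =====

-- row 0 of B: cell j is (j, rendered alignT 0 j)
theorem rowZeroB_partial (bI cI : List String) (n : Nat) :
    ∀ k, k ≤ n →
      ((List.range' 1 k).foldl (fun prev (j : Nat) =>
          prev ++ [(((j : Nat) : Int), (prev.getD (j - 1) (0, "")).2 ++ spanU (cI.getD (j - 1) ""))])
        [((0 : Int), "")]).length = k + 1 ∧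
      ∀ j ≤ k,
        ((List.range' 1 k).foldl (fun prev (j : Nat) =>
            prev ++ [(((j : Nat) : Int), (prev.getD (j - 1) (0, "")).2 ++ spanU (cI.getD (j - 1) ""))])
          [((0 : Int), "")]).getD j (0, "") = ((DB bI cI 0 j).1, PySem.Str.join "" (alignT bI cI 0 j)) := by
  intro k
  induction k with
  | zero =>
    intro _
    refine ⟨rfl, ?_⟩
    intro j hj
    have : j = 0 := by omega
    subst this
    simp [DB, alignT, join_nil]
  | succ k ihk =>
    intro hk
    obtain ⟨hl, hv⟩ := ihk (by omega)
    have hrc : List.range' 1 (k + 1) = List.range' 1 k ++ [k + 1] := by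
      rw [List.range'_concat]; simp [Nat.add_comm]
    rw [hrc, List.foldl_append]
    set r := (List.range' 1 k).foldl (fun prev (j : Nat) =>
      prev ++ [(((j : Nat) : Int), (prev.getD (j - 1) (0, "")).2 ++ spanU (cI.getD (j - 1) ""))])
      [((0 : Int), "")] with hrdef
    simp only [List.foldl_cons, List.foldl_nil, Nat.add_sub_cancel]
    have hprev : r.getD k (0, "") = ((DB bI cI 0 k).1, PySem.Str.join "" (alignT bI cI 0 k)) := hv k (le_refl _)
    refine ⟨by simp [hl], ?_⟩
    intro j hj
    by_cases hjk : j ≤ k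
    · rw [List.getD_append _ _ _ _ (by omega)]
      exact hv j hjk
    · have : j = k + 1 := by omega
      subst this
      rw [List.getD_append_right _ _ _ _ (by omega)]
      simp only [hl, Nat.sub_self, List.getD_cons_zero, hprev]
      have e1 : (DB bI cI 0 (k + 1)).1 = ((k + 1 : Nat) : Int) := by simp [DB]
      have e2 : alignT bI cI 0 (k + 1) = alignT bI cI 0 k ++ [spanU (cI.getD k "")] := by
        simp [alignT]
      rw [e2, join_append_one, e1]

-- one later row of B preserves the invariant
theorem rowStepB_spec (bI cI : List String) (prev : List (Int × String)) (i n : Nat) (hi : 1 ≤ i)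
    (hprev : ∀ j ≤ n, prev.getD j (0, "") = ((DB bI cI (i - 1) j).1, PySem.Str.join "" (alignT bI cI (i - 1) j))) :
    (rowStepB bI cI prev i n).length = n + 1 ∧
    ∀ j ≤ n, (rowStepB bI cI prev i n).getD j (0, "") = ((DB bI cI i j).1, PySem.Str.join "" (alignT bI cI i j)) := by
  obtain ⟨i', rfl⟩ : ∃ i', i = i' + 1 := ⟨i - 1, by omega⟩
  simp only [Nat.add_sub_cancel] at hprev ⊢
  have base : ∀ k, k ≤ n →
      ((List.range' 1 k).foldl (fun cur j =>
        cur ++ [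
          if bI.getD (i' + 1 - 1) "" = cI.getD (j - 1) "" then
            ((prev.getD (j - 1) (0, "")).1, (prev.getD (j - 1) (0, "")).2 ++ cI.getD (j - 1) "")
          else
            let cd := (prev.getD j (0, "")).1 + 1
            let ci := (cur.getD (j - 1) (0, "")).1 + 1
            let cs := (prev.getD (j - 1) (0, "")).1 + 1
            if cs ≤ cd ∧ cs ≤ ci then (cs, (prev.getD (j - 1) (0, "")).2 ++ spanU (cI.getD (j - 1) ""))
            else if cd ≤ ci then (cd, (prev.getD j (0, "")).2 ++ "_")
            else (ci, (cur.getD (j - 1) (0, "")).2 ++ spanU (cI.getD (j - 1) ""))])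
        [(((i' + 1 : Nat) : Int), (prev.getD 0 (0, "")).2 ++ "_")]).length = k + 1 ∧
      ∀ j ≤ k,
        ((List.range' 1 k).foldl (fun cur j =>
          cur ++ [
            if bI.getD (i' + 1 - 1) "" = cI.getD (j - 1) "" then
              ((prev.getD (j - 1) (0, "")).1, (prev.getD (j - 1) (0, "")).2 ++ cI.getD (j - 1) "")
            else
              let cd := (prev.getD j (0, "")).1 + 1
              let ci := (cur.getD (j - 1) (0, "")).1 + 1
              let cs := (prev.getD (j - 1) (0, "")).1 + 1
              if cs ≤ cd ∧ cs ≤ ci then (cs, (prev.getD (j - 1) (0, "")).2 ++ spanU (cI.getD (j - 1) ""))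
              else if cd ≤ ci then (cd, (prev.getD j (0, "")).2 ++ "_")
              else (ci, (cur.getD (j - 1) (0, "")).2 ++ spanU (cI.getD (j - 1) ""))])
          [(((i' + 1 : Nat) : Int), (prev.getD 0 (0, "")).2 ++ "_")]).getD j (0, "") = ((DB bI cI (i' + 1) j).1, PySem.Str.join "" (alignT bI cI (i' + 1) j)) := by
    intro k
    induction k with
    | zero =>
      intro _
      refine ⟨rfl, ?_⟩
      intro j hj
      have : j = 0 := by omega
      subst this
      simp only [List.range'_zero, List.foldl_nil, List.getD_cons_zero]
      rw [hprev 0 (by omega)]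
      have e1 : (DB bI cI (i' + 1) 0).1 = ((i' + 1 : Nat) : Int) := by simp [DB]
      have e2 : alignT bI cI (i' + 1) 0 = alignT bI cI i' 0 ++ ["_"] := by simp [alignT]
      rw [e2, join_append_one, e1]
    | succ k ihk =>
      intro hk
      obtain ⟨hl, hv⟩ := ihk (by omega)
      have hrc : List.range' 1 (k + 1) = List.range' 1 k ++ [k + 1] := by
        rw [List.range'_concat]; simp [Nat.add_comm]
      rw [hrc, List.foldl_append]
      set r := (List.range' 1 k).foldl (fun cur j =>
        cur ++ [
          if bI.getD (i' + 1 - 1) "" = cI.getD (j - 1) "" then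
            ((prev.getD (j - 1) (0, "")).1, (prev.getD (j - 1) (0, "")).2 ++ cI.getD (j - 1) "")
          else
            let cd := (prev.getD j (0, "")).1 + 1
            let ci := (cur.getD (j - 1) (0, "")).1 + 1
            let cs := (prev.getD (j - 1) (0, "")).1 + 1
            if cs ≤ cd ∧ cs ≤ ci then (cs, (prev.getD (j - 1) (0, "")).2 ++ spanU (cI.getD (j - 1) ""))
            else if cd ≤ ci then (cd, (prev.getD j (0, "")).2 ++ "_")
            else (ci, (cur.getD (j - 1) (0, "")).2 ++ spanU (cI.getD (j - 1) ""))])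
        [(((i' + 1 : Nat) : Int), (prev.getD 0 (0, "")).2 ++ "_")] with hrdef
      simp only [List.foldl_cons, List.foldl_nil, Nat.add_sub_cancel]
      have hcur : r.getD k (0, "") = ((DB bI cI (i' + 1) k).1, PySem.Str.join "" (alignT bI cI (i' + 1) k)) := hv k (le_refl _)
      have hstep :
          (if bI.getD i' "" = cI.getD k "" then
            ((prev.getD k (0, "")).1, (prev.getD k (0, "")).2 ++ cI.getD k "")
          else
            let cd := (prev.getD (k + 1) (0, "")).1 + 1
            let ci := (r.getD k (0, "")).1 + 1
            let cs := (prev.getD k (0, "")).1 + 1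
            if cs ≤ cd ∧ cs ≤ ci then (cs, (prev.getD k (0, "")).2 ++ spanU (cI.getD k ""))
            else if cd ≤ ci then (cd, (prev.getD (k + 1) (0, "")).2 ++ "_")
            else (ci, (r.getD k (0, "")).2 ++ spanU (cI.getD k ""))) =
          ((DB bI cI (i' + 1) (k + 1)).1, PySem.Str.join "" (alignT bI cI (i' + 1) (k + 1))) := by
        rw [hprev k (by omega), hprev (k + 1) (by omega), hcur]
        by_cases heq : bI.getD i' "" = cI.getD k ""
        · rw [if_pos heq]
          have e1 : (DB bI cI (i' + 1) (k + 1)).1 = (DB bI cI i' k).1 := by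
            simp only [DB]; rw [if_pos heq]
          have e2 : alignT bI cI (i' + 1) (k + 1) = alignT bI cI i' k ++ [cI.getD k ""] := by
            simp only [alignT]; rw [if_pos heq]
          rw [e1, e2, join_append_one]
        · rw [if_neg heq]
          have edb : (DB bI cI (i' + 1) (k + 1)).1 =
              min (min ((DB bI cI i' (k + 1)).1 + 1) ((DB bI cI (i' + 1) k).1 + 1)) ((DB bI cI i' k).1 + 1) := by
            simp only [DB]; rw [if_neg heq]; exact pymin3_fst _ _ _ _ _
          have ealn : alignT bI cI (i' + 1) (k + 1) =
              (if (DB bI cI i' k).1 + 1 ≤ (DB bI cI i' (k + 1)).1 + 1 ∧ (DB bI cI i' k).1 + 1 ≤ (DB bI cI (i' + 1) k).1 + 1 then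
                alignT bI cI i' k ++ [spanU (cI.getD k "")]
              else if (DB bI cI i' (k + 1)).1 + 1 ≤ (DB bI cI (i' + 1) k).1 + 1 then alignT bI cI i' (k + 1) ++ ["_"]
              else alignT bI cI (i' + 1) k ++ [spanU (cI.getD k "")]) := by
            simp only [alignT]; rw [if_neg heq]
          simp only
          by_cases hc1 : (DB bI cI i' k).1 + 1 ≤ (DB bI cI i' (k + 1)).1 + 1 ∧ (DB bI cI i' k).1 + 1 ≤ (DB bI cI (i' + 1) k).1 + 1
          · rw [if_pos hc1, ealn, if_pos hc1, join_append_one, edb]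
            have : min (min ((DB bI cI i' (k + 1)).1 + 1) ((DB bI cI (i' + 1) k).1 + 1)) ((DB bI cI i' k).1 + 1) = (DB bI cI i' k).1 + 1 := by omega
            rw [this]
          · rw [if_neg hc1]
            by_cases hc2 : (DB bI cI i' (k + 1)).1 + 1 ≤ (DB bI cI (i' + 1) k).1 + 1
            · rw [if_pos hc2, ealn, if_neg hc1, if_pos hc2, join_append_one, edb]
              have : min (min ((DB bI cI i' (k + 1)).1 + 1) ((DB bI cI (i' + 1) k).1 + 1)) ((DB bI cI i' k).1 + 1) = (DB bI cI i' (k + 1)).1 + 1 := by omega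
              rw [this]
            · rw [if_neg hc2, ealn, if_neg hc1, if_neg hc2, join_append_one, edb]
              have : min (min ((DB bI cI i' (k + 1)).1 + 1) ((DB bI cI (i' + 1) k).1 + 1)) ((DB bI cI i' k).1 + 1) = (DB bI cI (i' + 1) k).1 + 1 := by omega
              rw [this]
      refine ⟨by simp [hl], ?_⟩
      intro j hj
      by_cases hjk : j ≤ k
      · rw [List.getD_append _ _ _ _ (by omega)]
        exact hv j hjk
      · have : j = k + 1 := by omega
        subst this
        rw [List.getD_append_right _ _ _ _ (by omega)]
        simp only [hl, Nat.sub_self, List.getD_cons_zero]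
        exact hstep
  obtain ⟨hl, hv⟩ := base n (le_refl _)
  exact ⟨by simpa [rowStepB] using hl, fun j hj => by simpa [rowStepB] using hv j hj⟩

-- the last row of B's fold: cell j is (cost, rendered alignT m j)
theorem lastRowB_spec (bI cI : List String) (m n : Nat) :
    ∀ j ≤ n, (lastRowB bI cI m n).getD j (0, "") = ((DB bI cI m j).1, PySem.Str.join "" (alignT bI cI m j)) := by
  induction m with
  | zero =>
    intro j hj
    have := (rowZeroB_partial bI cI n n (le_refl _)).2 j hj
    simpa [lastRowB, rowZeroB] using this
  | succ m ihm =>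
    have hrc : List.range' 1 (m + 1) = List.range' 1 m ++ [m + 1] := by
      rw [List.range'_concat]; simp [Nat.add_comm]
    have e : lastRowB bI cI (m + 1) n = rowStepB bI cI (lastRowB bI cI m n) (m + 1) n := by
      simp [lastRowB, hrc]
    intro j hj
    rw [e]
    exact (rowStepB_spec bI cI (lastRowB bI cI m n) (m + 1) n (by omega)
      (by intro j' hj'; simpa using ihm j' hj')).2 j hj

-- ===== VERDICT (by name: the statement is the Claim_ definition above) =====
theorem find_ipa_diff_spec : Claim_equal_find_ipa_diff := by
  intro base compare _ _
  show find_ipa_diff base compare = find_ipa_diff_alt base compare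
  unfold find_ipa_diff find_ipa_diff_alt
  cases hb : (base.filter (fun p => p ≠ " ")).mapM arpa_to_ipa? with
  | none => rfl
  | some bI =>
    cases hc : (compare.filter (fun p => p ≠ " ")).mapM arpa_to_ipa? with
    | none => rfl
    | some cI =>
      simp only
      rw [walkA_align bI cI bI.length cI.length (bI.length + cI.length) bI.length cI.length []
        (le_refl _) (le_refl _) (le_refl _)]
      rw [show PySem.List.pyGetD (lastRowB bI cI bI.length cI.length) ((cI.length : Nat) : Int) ((0 : Int), "") =
            (lastRowB bI cI bI.length cI.length).getD cI.length (0, "") from by simp [PySem.List.pyGetD_natCast]]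
      rw [lastRowB_spec bI cI bI.length cI.length cI.length (le_refl _)]
      simp
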